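/- GENERATED by mk_final_copies.py from the proof of the farm's unit `vorbis_decode_initial.2` (farm:vorbis_decode_initial.2.1: Proof.lean) as the
   re-elaboration sweep compiled it — do not edit. -/
import Asan.CheckWalk
import Vorbis.Spec.Units.vorbis_decode_initial_2

open X86 X86.User Asan Vorbis Vorbis.Spec
open Vorbis.Spec.vorbis_decode_initial

set_option maxRecDepth 4000
set_option maxHeartbeats 4000000

/-- Segment 2 of `vorbis_decode_initial` (0x1131b0–0x1131e9 + 0x1133be, 15 instructions; stb_vorbis_fixed.c 3158–3163:
`if (f->eof) return FALSE; if (!maybe_start_packet(f)) return FALSE; if (get_bits(f,1) != 0) { … drain … }`): ONE ROUND of the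
retry loop from `IAt loop1`, WITHOUT the drain loop. Four paths: `f->eof` set (one check site, eax = 0, `IAtEnd`);
maybe_start_packet returned 0 (`IAtEnd`, eax = 0); get_bits(f,1) = 0 (`IAt at_1131fa`, ebp = `f->eof` = 0); get_bits(f,1) ≠ 0
(`IAt loop2`, μ strictly smaller: maybe_start_packet's `started` gives `valid_bits = 0`, so get_bits' `progress` clause says a
byte was paged in). A SEGMENT proof: the walk starts at `s` in the middle of the function; `u` is the state at the function's
entry (`IEntered`). -/
theorem Vorbis.Spec.Worked.vorbis_decode_initial_2_ok : Vorbis.Spec.vorbis_decode_initial_2.Statement := by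
  intro Lay hLay μ hμ u₀ hcode hload4 h_msp h_gb others frames len A stored room ysz u ret s hE hs
  have he := hE.entry
  have hpre := hE.pre
  have hmsp := h_msp others frames (RunBlk A len) len
  have hgb := h_gb others frames (RunBlk A len) len
  clear h_msp h_gb hE
  v_entry he
  obtain ⟨hsh, hinv, hpls, hple, hprs, hpre_, hpm, hapart⟩ := hpre
  have hsp := hsh.rsp
  have hobj := hinv.objLive
  have hwhere := hobj.where_ hsh.inv hsh.offText (by decide)
  simp only [Off.sizeof.stb_vorbis] at hwhere
  have henv := hinv.readerEnv
  clear hinv hapart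
  obtain ⟨w_rip, w_rsp, w_rbx, w_r12, w_r13, w_r14, w_kept, w_eq, hsame, hun, hs0, hs1, hs2, hs3, hs4, hs5, hs6, hs7, hs8,
    hdf, hmx, hbits, hcbs, hcbe⟩ := hs
  unfold iLoopRegs at w_kept
  u_walk hcode [hμ.vendor] until [Vorbis.L.vorbis_decode_initial.loop1, Vorbis.L.vorbis_decode_initial.loop2, Vorbis.L.vorbis_decode_initial.at_1131fa, Vorbis.L.vorbis_decode_initial.at_1133c3] span [Vorbis.L.textLo, Vorbis.L.textHi] side (v_side)
  case check_1131b7 =>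
    have hun' : ShadowUntouched u.mem s_1131b7.mem := by v_untouched
    refine hobj.accSmall hsh.inv hun' _ 4 (by decide) (by u_omega) ?_
    simp only [Vorbis.Off.sizeof.stb_vorbis]
    u_omega
  case call_inv =>
    v_inv
  case pre_1131cd =>
    have hun' : ShadowUntouched u.mem s_1131cd.mem := by v_untouched
    have hsh' : ShadowPre others frames s_1131cd := hsh.call hun' (by u_omega) (by u_omega) (by u_omega)
    have hkeep := Reader.store_off_obj hbits (u.reg .rsp - 96) 8 1126866 (by u_omega) (by u_omega)
    rw [← w_mem] at hkeep
    refine ⟨hsh', ?_, ?_⟩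
    · rw [w_rdi]
      exact henv
    · rw [w_rdi]
      exact hkeep.1.bits
  · -- 0x1131c4 `jne` taken: `f->eof` is set, eax = 0, the epilogue
    refine ReachVia.done (Or.inl ?_)
    have hkeep := Reader.store_off_obj hbits (u.reg .rsp - 96) 8 1126844 (by u_omega) (by u_omega)
    rw [← w_mem] at hkeep
    refine ⟨w_rip, w_rsp, w_kept.mono_all (by rfl), w_eq, ?_, by v_untouched, by u_resolve, by u_resolve, by u_resolve,
      by u_resolve, by u_resolve, by u_resolve, by u_resolve, ?_, ?_, hkeep.1.bits, ?_, ?_, ?_, ?_⟩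
    · rw [w_mem]
      exact Mem.SameExcept.step_writeLE' (u.reg .rsp - 96) 8 1126844 (di_widen hsame) (by u_omega) (by u_same_side)
    · rw [w_flags]
      simp only [X86.User.df_setStatus]
      exact w_df_1131b7
    · rw [w_mxcsr]
      exact hmx
    · rw [w_mem]
      u_read
      try exact hcbs
    · rw [w_mem]
      u_read
      try exact hcbe
    · left
      rw [w_rax]
      decide
    · intro h
      rw [w_rax] at h
      exact absurd h (by decide)
  -- 0x1131d2, the state maybe_start_packet returned
  have c_rdi := w_rdi_1131cd
  v_after_call w_rsp_1131cd w_mem_1131cd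
  simp only [c_rdi] at w_same
  have hpost : StartPacketPost (RunBlk A len) len (u.reg .rdi).toNat s_1131cd s_1131cdr := by
    rw [← c_rdi]
    exact w_post
  have hkeep := Reader.store_off_obj hbits (u.reg .rsp - 96) 8 1126866 (by u_omega) (by u_omega)
  rw [← w_mem_1131cd] at hkeep
  have hs0r : UInt64.ofNat (s_1131cdr.mem.readLE (u.reg .rsp) 8) = ret := by u_frame hs0
  have hs1r : UInt64.ofNat (s_1131cdr.mem.readLE (u.reg .rsp - 8) 8) = u.reg .r15 := by u_frame hs1
  have hs2r : UInt64.ofNat (s_1131cdr.mem.readLE (u.reg .rsp - 16) 8) = u.reg .r14 := by u_frame hs2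
  have hs3r : UInt64.ofNat (s_1131cdr.mem.readLE (u.reg .rsp - 24) 8) = u.reg .r13 := by u_frame hs3
  have hs4r : UInt64.ofNat (s_1131cdr.mem.readLE (u.reg .rsp - 32) 8) = u.reg .r12 := by u_frame hs4
  have hs5r : UInt64.ofNat (s_1131cdr.mem.readLE (u.reg .rsp - 40) 8) = u.reg .rbp := by u_frame hs5
  have hs6r : UInt64.ofNat (s_1131cdr.mem.readLE (u.reg .rsp - 48) 8) = u.reg .rbx := by u_frame hs6
  have hs7r : UInt64.ofNat (s_1131cdr.mem.readLE (u.reg .rsp - 80) 8) = u.reg .rcx := by u_frame hs7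
  have hs8r : UInt64.ofNat (s_1131cdr.mem.readLE (u.reg .rsp - 72) 8) = u.reg .r8 := by u_frame hs8
  have hcbsr : s_1131cdr.mem.readLE (u.reg .rdi + 1800) 4 = 0 := by u_frame hcbs
  have hcber : s_1131cdr.mem.readLE (u.reg .rdi + 1796) 4 = 0 := by u_frame hcbe
  have hunr : ShadowUntouched u.mem s_1131cdr.mem := by v_untouched
  have hpush : Mem.SameExcept _ u.mem (s.mem.writeLE (u.reg .rsp - 96) 8 1126866) :=
    Mem.SameExcept.step_writeLE' (u.reg .rsp - 96) 8 1126866 hsame (by u_omega) (by u_same_side)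
  have hsamer := Reader.sameExcept_through_callee hpush w_same (by
    simp only [List.forall_mem_cons, List.not_mem_nil, false_imp_iff, implies_true, and_true, X86.User.inSpans_cons,
      X86.User.inSpans_nil, or_false]
    repeat' apply And.intro
    all_goals u_omega)
  have hbitsr : Bits (RunBlk A len) len s_1131cdr.mem (u.reg .rdi).toNat := hpost.reader.bits
  have hmur : mu s_1131cdr.mem (u.reg .rdi).toNat ≤ mu s.mem (u.reg .rdi).toNat :=
    Nat.le_trans hpost.reader.mu_le hkeep.1.mu_le
  have hres := hpost.result
  have hstarted := hpost.started
  obtain ⟨z, w_rax⟩ : ∃ z, s_1131cdr.reg .rax = z := ⟨_, rfl⟩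
  rw [w_rax] at hres hstarted
  clear w_same hkeep hpush hpost w_post hsame hs0 hs1 hs2 hs3 hs4 hs5 hs6 hs7 hs8 hcbs hcbe hbits hun
  u_walk hcode [hμ.vendor] until [Vorbis.L.vorbis_decode_initial.loop1, Vorbis.L.vorbis_decode_initial.loop2, Vorbis.L.vorbis_decode_initial.at_1131fa, Vorbis.L.vorbis_decode_initial.at_1133c3] span [Vorbis.L.textLo, Vorbis.L.textHi] side (v_side)
  case call_inv =>
    v_inv
  case pre_1131e2 =>
    have hun' : ShadowUntouched u.mem s_1131e2.mem := by v_untouched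
    have hsh' : ShadowPre others frames s_1131e2 := hsh.call hun' (by u_omega) (by u_omega) (by u_omega)
    have hkeep := Reader.store_off_obj hbitsr (u.reg .rsp - 96) 8 1126887 (by u_omega) (by u_omega)
    rw [← w_mem] at hkeep
    refine ⟨⟨hsh', ?_, ?_⟩, ?_⟩
    · rw [w_rdi]
      exact henv
    · rw [w_rdi]
      exact hkeep.1.bits
    · rw [bitsArg_def, w_rsi]
      decide
  · -- 0x1131d4 `je` taken: maybe_start_packet returned 0, the epilogue with eax = 0
    have hz : z = 0 := by
      rcases hres with h | h
      · exact h
      · exfalso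
        rw [h] at hbr_1131d4
        exact absurd hbr_1131d4 (by decide)
    refine ReachVia.done (Or.inl ?_)
    refine ⟨w_rip, w_rsp, w_kept.mono_all (by rfl), w_eq, ?_, ?_, ?_, ?_, ?_, ?_, ?_, ?_, ?_, ?_, ?_, ?_, ?_, ?_, ?_, ?_⟩
    all_goals try rw [w_mem]
    all_goals first
      | (with_reducible assumption)
      | skip
    · exact di_widen hsamer
    · rw [w_flags]
      simp only [X86.User.df_setStatus]
      exact w_df
    · rw [w_mxcsr]
      exact w_mx
    · left
      rw [w_rax, hz]
      decide
    · intro h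
      rw [w_rax, hz] at h
      exact absurd h (by decide)
  -- 0x1131e7, the state get_bits(f, 1) returned
  have hz : z = 1 := by
    rcases hres with h | h
    · exfalso
      rw [h] at hbr_1131d4
      exact hbr_1131d4 (by decide)
    · exact h
  have c_rdi2 := w_rdi_1131e2
  v_after_call w_rsp_1131e2 w_mem_1131e2
  simp only [c_rdi2] at w_same
  have hn1 : bitsArg s_1131e2 = 1 := by
    rw [bitsArg_def, w_rsi_1131e2]
    decide
  have hpost : GetBitsPost (RunBlk A len) len s_1131e2.mem s_1131e2r.mem (u.reg .rdi).toNat 1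
      (s_1131e2r.reg .rax).toNat := by
    have h := w_post.bits
    rw [c_rdi2, hn1] at h
    exact h
  have hkeep := Reader.store_off_obj hbitsr (u.reg .rsp - 96) 8 1126887 (by u_omega) (by u_omega)
  rw [← w_mem_1131e2] at hkeep
  have hvb0 : stb_vorbis.valid_bits s_1131e2.mem (u.reg .rdi).toNat = 0 := by
    rw [hkeep.2.1]
    exact (hstarted hz).2.2.1
  have hprog := hpost.progress hvb0 (Nat.le_refl 1)
  have hs0q : UInt64.ofNat (s_1131e2r.mem.readLE (u.reg .rsp) 8) = ret := by u_frame hs0r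
  have hs1q : UInt64.ofNat (s_1131e2r.mem.readLE (u.reg .rsp - 8) 8) = u.reg .r15 := by u_frame hs1r
  have hs2q : UInt64.ofNat (s_1131e2r.mem.readLE (u.reg .rsp - 16) 8) = u.reg .r14 := by u_frame hs2r
  have hs3q : UInt64.ofNat (s_1131e2r.mem.readLE (u.reg .rsp - 24) 8) = u.reg .r13 := by u_frame hs3r
  have hs4q : UInt64.ofNat (s_1131e2r.mem.readLE (u.reg .rsp - 32) 8) = u.reg .r12 := by u_frame hs4r
  have hs5q : UInt64.ofNat (s_1131e2r.mem.readLE (u.reg .rsp - 40) 8) = u.reg .rbp := by u_frame hs5r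
  have hs6q : UInt64.ofNat (s_1131e2r.mem.readLE (u.reg .rsp - 48) 8) = u.reg .rbx := by u_frame hs6r
  have hs7q : UInt64.ofNat (s_1131e2r.mem.readLE (u.reg .rsp - 80) 8) = u.reg .rcx := by u_frame hs7r
  have hs8q : UInt64.ofNat (s_1131e2r.mem.readLE (u.reg .rsp - 72) 8) = u.reg .r8 := by u_frame hs8r
  have hcbsq : s_1131e2r.mem.readLE (u.reg .rdi + 1800) 4 = 0 := by u_frame hcbsr
  have hcbeq : s_1131e2r.mem.readLE (u.reg .rdi + 1796) 4 = 0 := by u_frame hcber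
  have hunq : ShadowUntouched u.mem s_1131e2r.mem := by v_untouched
  have hpush : Mem.SameExcept _ u.mem (s_1131cdr.mem.writeLE (u.reg .rsp - 96) 8 1126887) :=
    Mem.SameExcept.step_writeLE' (u.reg .rsp - 96) 8 1126887 hsamer (by u_omega) (by u_same_side)
  have hsameq := Reader.sameExcept_through_callee hpush w_same (by
    simp only [List.forall_mem_cons, List.not_mem_nil, false_imp_iff, implies_true, and_true, X86.User.inSpans_cons,
      X86.User.inSpans_nil, or_false]
    repeat' apply And.intro
    all_goals u_omega)
  have hbitsq : Bits (RunBlk A len) len s_1131e2r.mem (u.reg .rdi).toNat := hpost.bits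
  have hmu1 : mu s_1131e2.mem (u.reg .rdi).toNat ≤ mu s.mem (u.reg .rdi).toNat := Nat.le_trans hkeep.1.mu_le hmur
  have hmu2 := hpost.mu_le
  obtain ⟨z2, w_rax2⟩ : ∃ z2, s_1131e2r.reg .rax = z2 := ⟨_, rfl⟩
  rw [w_rax2] at hprog
  have hrbp0 : Word.ofBV (BitVec.ofNat 32 (s.mem.readLE (u.reg .rdi + 136) 4)) = 0 := by
    have e : BitVec.ofNat 32 (s.mem.readLE (u.reg .rdi + 136) 4) = 0#32 := by
      apply BitVec.eq_of_toNat_eq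
      rw [BitVec.toNat_ofNat]
      exact hbr_1131c4
    rw [e]
    rfl
  clear w_same hkeep hpush hpost w_post hsamer hs0r hs1r hs2r hs3r hs4r hs5r hs6r hs7r hs8r hcbsr hcber hbitsr hunr
  u_walk hcode [hμ.vendor] until [Vorbis.L.vorbis_decode_initial.loop1, Vorbis.L.vorbis_decode_initial.loop2, Vorbis.L.vorbis_decode_initial.at_1131fa, Vorbis.L.vorbis_decode_initial.at_1133c3] span [Vorbis.L.textLo, Vorbis.L.textHi] side (v_side)
  · -- 0x1131e9 `je` taken: get_bits(f, 1) = 0, the loop is left at 0x1131fa with ebp = 0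
    refine ReachVia.done (Or.inr (Or.inl ⟨?_, ?_⟩))
    · refine ⟨w_rip, w_rsp, w_rbx, w_r12, w_r13, w_r14, w_kept.mono_all (by rfl), w_eq, ?_, ?_, ?_, ?_, ?_, ?_, ?_, ?_, ?_,
        ?_, ?_, ?_, ?_, ?_, ?_, ?_⟩
      all_goals try rw [w_mem]
      all_goals first
        | (with_reducible assumption)
        | skip
      · rw [w_flags]
        simp only [X86.User.df_setStatus]
        exact w_df
      · rw [w_mxcsr]
        exact w_mx
    · rw [w_rbp]
      exact hrbp0
  · -- 0x1131e9 `je` not taken: the packet is not audio: the head `loop2` of the drain loop, μ strictly smaller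
    have hz2 : ¬ z2.toNat = 0 := by
      intro h
      apply hbr_1131e9
      have e : z2 = 0 := UInt64.toNat_inj.mp h
      rw [e]
      decide
    have hlt : mu s_1131e2r.mem (u.reg .rdi).toNat < mu s_1131e2.mem (u.reg .rdi).toNat := by
      rcases hprog with h | h
      · exact absurd h.1 hz2
      · exact h
    have hat2 : IAt Vorbis.L.vorbis_decode_initial.loop2 (RunBlk A len) len u₀ u ret s_1131e9 := by
      refine ⟨w_rip, w_rsp, w_rbx, w_r12, w_r13, w_r14, w_kept.mono_all (by rfl), w_eq, ?_, ?_, ?_, ?_, ?_, ?_, ?_, ?_, ?_,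
        ?_, ?_, ?_, ?_, ?_, ?_, ?_⟩
      all_goals try rw [w_mem]
      all_goals first
        | (with_reducible assumption)
        | skip
      · rw [w_flags]
        simp only [X86.User.df_setStatus]
        exact w_df
      · rw [w_mxcsr]
        exact w_mx
    refine ReachVia.done (Or.inr (Or.inr ⟨hat2, ?_⟩))
    rw [w_mem]
    omega
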